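-- pv_equiv track=rewrite | github.com/ikramulkayes/Python_Season_4 | 78.py | func
-- ===== SOURCE A (Python) =====
-- def func(word,index=0,temp=""):
--     a = word[index]
--     flag = False
--     for elm in temp:
--         if elm == a:
--             flag = True
--     if flag:
--         if index ==len(word)-1:
--             return ""
--         else:
--             return func(word,index+1,temp)
--     else:
--         if index ==len(word)-1:
--             return a
--         elif a == " ":
--             return a+ func(word,index+1)
--         else:
--             temp += a
--             return a+ func(word,index+1,temp)
-- ===== SOURCE B (Python) =====
-- def func(word, index=0, temp=""):
--     seen = set(temp)
--     out = []
--     i = index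
--     while True:
--         a = word[i]
--         if a not in seen:
--             out.append(a)
--             if a == ' ':
--                 seen = set()
--             else:
--                 seen.add(a)
--         if i == len(word) - 1:
--             return ''.join(out)
--         i += 1
-- ===== Notes on version B (the rewrite author's own statement) =====
-- stated objective: faster
-- what changed: Replaces A's recursion (which rescans the accumulated temp string for every character and rebuilds the result by string concatenation) with a single iterative while-loop over an explicit index, keeping a hash set of seen characters and an output list, so the inner scan of temp disappears.
import Mathlib
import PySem

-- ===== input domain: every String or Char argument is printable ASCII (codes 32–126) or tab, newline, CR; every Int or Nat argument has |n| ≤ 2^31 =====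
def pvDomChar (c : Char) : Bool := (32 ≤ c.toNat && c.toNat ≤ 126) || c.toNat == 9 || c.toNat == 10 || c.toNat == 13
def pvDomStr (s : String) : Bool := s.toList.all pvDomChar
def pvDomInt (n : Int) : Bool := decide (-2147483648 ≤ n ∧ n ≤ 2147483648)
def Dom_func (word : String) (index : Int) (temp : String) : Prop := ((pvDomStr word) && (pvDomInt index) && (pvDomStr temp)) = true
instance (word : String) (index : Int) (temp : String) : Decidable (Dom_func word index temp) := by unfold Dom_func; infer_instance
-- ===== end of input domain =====

-- B replaces A's recursion (which re-scans temp for every char) with one iterative linear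
-- loop over an index, a seen-set and an output accumulator (objective: faster, O(n^2) -> O(n)).

-- ===== PORT A =====
-- fuel makes the recursion total; 2*len+1 is always enough (index grows to len-1, or
-- word[index] is out of range at once — where Python raises, excluded by Pre_).
def funcAux : Nat → List Char → Int → List Char → List Char
  | 0, _, _, _ => []
  | n+1, word, index, temp =>
    match PySem.List.pyGet? word index with
    | none => []  -- Python raises IndexError here; outside Pre_
    | some a =>
      let flag := temp.foldl (fun f elm => if elm = a then true else f) false
      if flag then
        if index = (word.length : Int) - 1 then [] else funcAux n word (index+1) temp
      else if index = (word.length : Int) - 1 then [a]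
      else if a = ' ' then a :: funcAux n word (index+1) []
      else a :: funcAux n word (index+1) (temp ++ [a])

def func (word : String) (index : Int) (temp : String) : String :=
  String.ofList (funcAux (2 * word.toList.length + 1) word.toList index temp.toList)

-- ===== PORT B =====
def funcAltAux : Nat → List Char → Int → PySem.Set Char → List Char → List Char
  | 0, _, _, _, out => out
  | n+1, word, i, seen, out =>
    match PySem.List.pyGet? word i with
    | none => out  -- Python raises IndexError here; outside Pre_
    | some a =>
      let p := if PySem.Set.contains seen a then (seen, out)
               else ((if a = ' ' then PySem.Set.empty else PySem.Set.add seen a), out ++ [a])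
      if i = (word.length : Int) - 1 then p.2 else funcAltAux n word (i+1) p.1 p.2

def func_alt (word : String) (index : Int) (temp : String) : String :=
  String.ofList (funcAltAux (2 * word.toList.length + 1) word.toList index
    (PySem.Set.ofList temp.toList) [])

-- ===== PRECONDITION & SPEC =====
-- Pre_ excludes exactly the inputs where Python's word[index] raises IndexError
-- (empty word, or starting index outside [-len, len-1]).
def Pre_func (word : String) (index : Int) (temp : String) : Prop :=
  -(word.toList.length : Int) ≤ index ∧ index ≤ (word.toList.length : Int) - 1
instance (word : String) (index : Int) (temp : String) : Decidable (Pre_func word index temp) := by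
  unfold Pre_func; infer_instance

def pvWitness_func : String × Int × String := ("abcab cc", 0, "")

def Spec_func (word : String) (index : Int) (temp : String) (out : String) : Prop := out = func_alt word index temp
instance (word : String) (index : Int) (temp : String) (out : String) : Decidable (Spec_func word index temp out) := by unfold Spec_func; infer_instance

-- ===== CLAIM (what is proved, stated in full; the proofs are below) =====
def Claim_equal_func : Prop := ∀ (word : String) (index : Int) (temp : String), Dom_func word index temp → Pre_func word index temp → Spec_func word index temp (func word index temp)

-- ===== LEMMAS AND PROOFS =====

-- A's inner for-loop over temp computes membership of a in temp.
theorem flag_eq (temp : List Char) (a : Char) (b : Bool) :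
    temp.foldl (fun f elm => if elm = a then true else f) b = (b || decide (a ∈ temp)) := by
  induction temp generalizing b with
  | nil => simp
  | cons x xs ih =>
    simp only [List.foldl_cons, List.mem_cons]
    rw [ih]
    by_cases h : x = a
    · simp [h]
    · have h' : ¬ a = x := fun e => h e.symm
      simp [h, h']

-- Loop invariant: if seen has the same members as temp, B's tail recursion equals
-- out ++ A's recursion.
theorem aux_eq (n : Nat) : ∀ (word : List Char) (i : Int) (temp : List Char)
    (seen : PySem.Set Char) (out : List Char),
    (∀ c, c ∈ seen ↔ c ∈ temp) →
    funcAltAux n word i seen out = out ++ funcAux n word i temp := by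
  induction n with
  | zero => intro word i temp seen out _; simp [funcAux, funcAltAux]
  | succ n ih =>
    intro word i temp seen out hmem
    simp only [funcAux, funcAltAux]
    cases hget : PySem.List.pyGet? word i with
    | none => simp
    | some a =>
      by_cases hin : a ∈ temp
      · have hc : PySem.Set.contains seen a = true := by
          rw [PySem.Set.contains_iff]; exact (hmem a).2 hin
        simp only [flag_eq, hc, hin, decide_true, Bool.false_or, if_true]
        split_ifs with hlast
        · simp
        · exact ih word (i+1) temp seen out hmem
      · have hc : PySem.Set.contains seen a = false := by
          rw [Bool.eq_false_iff, Ne, PySem.Set.contains_iff]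
          exact fun h => hin ((hmem a).1 h)
        simp only [flag_eq, hc, hin, decide_false, Bool.false_or, Bool.false_eq_true, if_false]
        by_cases hsp : a = ' '
        · simp only [hsp, if_true]
          split_ifs with hlast
          · rfl
          · show funcAltAux n word (i+1) PySem.Set.empty (out ++ [' ']) =
              out ++ ' ' :: funcAux n word (i+1) []
            rw [ih word (i+1) [] PySem.Set.empty (out ++ [' ']) (by simp [PySem.Set.empty])]
            simp
        · simp only [hsp, if_false]
          split_ifs with hlast
          · rfl
          · show funcAltAux n word (i+1) (PySem.Set.add seen a) (out ++ [a]) =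
              out ++ a :: funcAux n word (i+1) (temp ++ [a])
            rw [ih word (i+1) (temp ++ [a]) (PySem.Set.add seen a) (out ++ [a])
              (by intro c; simp [PySem.Set.mem_add, hmem c])]
            simp

-- ===== VERDICT (by name: the statement is the Claim_ definition above) =====
theorem func_spec : Claim_equal_func := by
  intro word index temp _ _
  unfold Spec_func func func_alt
  rw [aux_eq _ word.toList index temp.toList (PySem.Set.ofList temp.toList) []
    (fun c => PySem.Set.mem_ofList temp.toList c)]
  simp
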